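-- pv_equiv track=rewrite | github.com/naironln/zestful | backend/app/services/nutrition_source_service.py | _find_product_for_ingredient
-- ===== SOURCE A (Python) =====
-- _STOP_WORDS = frozenset({
--     "de", "do", "da", "dos", "das", "com", "sem", "e", "ou", "para", "por",
--     "em", "no", "na", "nos", "nas", "um", "uma", "o", "a", "os", "as",
--     "sabor", "tipo", "zero", "light", "diet",
-- })
--
-- def _stem_pt(word: str) -> str:
--     """Minimal Portuguese stemming for matching (gender/plural normalization)."""
--     if word.endswith("s") and len(word) > 3:
--         word = word[:-1]
--     for suffix in ("ica", "ico", "ica", "ada", "ado", "ido", "ida"):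
--         if word.endswith(suffix) and len(word) > len(suffix) + 2:
--             return word[: -len(suffix)]
--     return word
--
-- def _significant_words(text: str) -> set[str]:
--     """Extract significant stemmed words (3+ chars, not stop words) from text."""
--     return {
--         _stem_pt(w) for w in text.lower().split()
--         if len(w) >= 3 and w not in _STOP_WORDS
--     }
--
-- def _find_product_for_ingredient(
--     ingredient: str, product_identifiers: list[dict]
-- ) -> dict | None:
--     """Find a product identifier matching this ingredient.
--
--     Uses a multi-level matching strategy:
--     1. Substring match (ingredient in product name or vice versa)
--     2. Word overlap (2+ significant words in common)
--     3. Single-product fallback (1 ingredient + 1 product = auto-match)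
--     """
--     if not product_identifiers:
--         return None
--
--     ing_lower = ingredient.lower()
--     ing_words = _significant_words(ingredient)
--
--     best_match: dict | None = None
--     best_overlap = 0
--
--     for product in product_identifiers:
--         name = product.get("name", "").lower()
--         ptype = product.get("type", "").lower()
--         brand = product.get("brand", "").lower()
--
--         if ing_lower in name or name in ing_lower or ing_lower in ptype:
--             return product
--
--         product_words = _significant_words(name) | _significant_words(ptype) | _significant_words(brand)
--         overlap = len(ing_words & product_words)
--         if overlap >= 2 and overlap > best_overlap:
--             best_match = product
--             best_overlap = overlap
--
--     if best_match:
--         return best_match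
--
--     if len(product_identifiers) == 1:
--         return product_identifiers[0]
--
--     return None
-- ===== SOURCE B (Python) =====
-- _STOP_WORDS = frozenset({
--     "de", "do", "da", "dos", "das", "com", "sem", "e", "ou", "para", "por",
--     "em", "no", "na", "nos", "nas", "um", "uma", "o", "a", "os", "as",
--     "sabor", "tipo", "zero", "light", "diet",
-- })
--
--
-- def _stem_pt(word: str) -> str:
--     if word.endswith("s") and len(word) > 3:
--         word = word[:-1]
--     for suffix in ("ica", "ico", "ica", "ada", "ado", "ido", "ida"):
--         if word.endswith(suffix) and len(word) > len(suffix) + 2: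
--             return word[: -len(suffix)]
--     return word
--
--
-- def _significant_words(text: str) -> set:
--     return {
--         _stem_pt(w) for w in text.lower().split()
--         if len(w) >= 3 and w not in _STOP_WORDS
--     }
--
--
-- def _find_product_for_ingredient(ingredient, product_identifiers):
--     ing_lower = ingredient.lower()
--
--     def substring_match(product):
--         name = product.get("name", "").lower()
--         ptype = product.get("type", "").lower()
--         return ing_lower in name or name in ing_lower or ing_lower in ptype
--
--     # Pass 1: first product matching by substring wins outright.
--     first = next((p for p in product_identifiers if substring_match(p)), None)
--     if first is not None:
--         return first
--
--     # Pass 2: word-overlap scoring; max() keeps the first maximal product.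
--     ing_words = _significant_words(ingredient)
--
--     def overlap(product):
--         words = (_significant_words(product.get("name", "").lower())
--                  | _significant_words(product.get("type", "").lower())
--                  | _significant_words(product.get("brand", "").lower()))
--         return len(ing_words & words)
--
--     best = max(product_identifiers, key=overlap, default=None)
--     if best is not None and overlap(best) >= 2:
--         return best
--
--     # Single-product fallback.
--     if len(product_identifiers) == 1:
--         return product_identifiers[0]
--     return None
-- ===== Notes on version B (the rewrite author's own statement) =====
-- stated objective: simpler
-- what changed: A's single fused loop carrying best_match/best_overlap state is decomposed into two stateless passes: a first-substring-match search (next/find?) and, failing that, a max-with-key overlap selection (first maximal wins, threshold >= 2), followed by the single-product fallback.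
import Mathlib
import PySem

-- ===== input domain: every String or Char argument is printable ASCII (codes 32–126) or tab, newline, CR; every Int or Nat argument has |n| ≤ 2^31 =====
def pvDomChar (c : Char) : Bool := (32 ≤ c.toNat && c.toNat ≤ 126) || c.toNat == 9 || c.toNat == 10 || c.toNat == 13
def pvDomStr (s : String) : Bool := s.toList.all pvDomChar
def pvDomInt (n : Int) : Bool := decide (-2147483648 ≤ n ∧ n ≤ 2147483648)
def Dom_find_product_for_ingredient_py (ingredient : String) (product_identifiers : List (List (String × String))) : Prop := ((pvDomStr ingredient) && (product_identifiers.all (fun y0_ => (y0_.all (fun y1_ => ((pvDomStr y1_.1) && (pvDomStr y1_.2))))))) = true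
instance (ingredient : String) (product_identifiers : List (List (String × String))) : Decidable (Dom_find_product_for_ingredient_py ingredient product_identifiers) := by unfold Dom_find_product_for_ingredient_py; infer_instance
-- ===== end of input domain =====

-- B splits A's single fused loop into two passes (first substring match via find?, then best
-- word overlap via max with key) — objective: simpler decomposition, same cost.

-- ===== PORT A =====
-- shared module helpers (_STOP_WORDS, _stem_pt, _significant_words), identical in Source A and Source B

def pvStopWords : List (List Char) :=
  (["de", "do", "da", "dos", "das", "com", "sem", "e", "ou", "para", "por",
    "em", "no", "na", "nos", "nas", "um", "uma", "o", "a", "os", "as",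
    "sabor", "tipo", "zero", "light", "diet"]).map String.toList

def pvStem (w0 : List Char) : List Char :=
  -- if word.endswith("s") and len(word) > 3: word = word[:-1]
  let w := if PySem.Chars.endswith w0 ['s'] && decide (3 < w0.length)
           then PySem.Chars.slice w0 none (some (-1)) else w0
  -- for suffix in (...): if word.endswith(suffix) and len(word) > len(suffix)+2: return word[:-len(suffix)]
  match ([['i','c','a'], ['i','c','o'], ['i','c','a'], ['a','d','a'],
          ['a','d','o'], ['i','d','o'], ['i','d','a']].findSome? fun suf =>
      if PySem.Chars.endswith w suf && decide (suf.length + 2 < w.length)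
      then some (PySem.Chars.slice w none (some (-(suf.length : Int)))) else none) with
  | some r => r
  | none => w

def pvSigWords (t : List Char) : PySem.Set (List Char) :=
  PySem.Set.ofList (((PySem.Chars.split₀ (PySem.Chars.lower t)).filter
    (fun w => decide (3 ≤ w.length) && !(pvStopWords.contains w))).map pvStem)

-- the fused loop of A, carrying best_match / best_overlap; at the end of the list it performs
-- the post-loop 'if best_match: return best_match' (dict truthiness) and yields none otherwise
def pvLoopA (ingL : List Char) (ingW : PySem.Set (List Char)) :
    List (List (String × String)) → Option (List (String × String)) → Int →
    Option (List (String × String))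
  | [], best, _ =>
      match best with
      | some b => if b.isEmpty then none else some b
      | none => none
  | p :: rest, best, bestOv =>
      let name := PySem.Chars.lower (PySem.Dict.getD ⟨p⟩ "name" "").toList
      let ptype := PySem.Chars.lower (PySem.Dict.getD ⟨p⟩ "type" "").toList
      let brand := PySem.Chars.lower (PySem.Dict.getD ⟨p⟩ "brand" "").toList
      if PySem.Chars.isIn ingL name || PySem.Chars.isIn name ingL || PySem.Chars.isIn ingL ptype then
        some p
      else
        let pw := PySem.Set.union (PySem.Set.union (pvSigWords name) (pvSigWords ptype)) (pvSigWords brand)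
        let ov := PySem.Set.len (PySem.Set.inter ingW pw)
        if decide (2 ≤ ov) && decide (bestOv < ov) then pvLoopA ingL ingW rest (some p) ov
        else pvLoopA ingL ingW rest best bestOv

def find_product_for_ingredient_py (ingredient : String) (product_identifiers : List (List (String × String))) : Option (List (String × String)) :=
  if product_identifiers.isEmpty then none
  else
    let ingL := PySem.Chars.lower ingredient.toList
    let ingW := pvSigWords ingredient.toList
    match pvLoopA ingL ingW product_identifiers none 0 with
    | some r => some r
    | none =>
        if product_identifiers.length == 1 then product_identifiers.head? else none

-- ===== PORT B =====

def pvSubMatch (ingL : List Char) (p : List (String × String)) : Bool :=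
  let name := PySem.Chars.lower (PySem.Dict.getD ⟨p⟩ "name" "").toList
  let ptype := PySem.Chars.lower (PySem.Dict.getD ⟨p⟩ "type" "").toList
  PySem.Chars.isIn ingL name || PySem.Chars.isIn name ingL || PySem.Chars.isIn ingL ptype

def pvOverlap (ingW : PySem.Set (List Char)) (p : List (String × String)) : Int :=
  let words := PySem.Set.union (PySem.Set.union
      (pvSigWords (PySem.Chars.lower (PySem.Dict.getD ⟨p⟩ "name" "").toList))
      (pvSigWords (PySem.Chars.lower (PySem.Dict.getD ⟨p⟩ "type" "").toList)))
      (pvSigWords (PySem.Chars.lower (PySem.Dict.getD ⟨p⟩ "brand" "").toList))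
  PySem.Set.len (PySem.Set.inter ingW words)

-- len(product_identifiers) == 1 fallback, shared by the two tails of B
def pvSingle (pis : List (List (String × String))) : Option (List (String × String)) :=
  if pis.length == 1 then pis.head? else none

def find_product_for_ingredient_py_alt (ingredient : String) (product_identifiers : List (List (String × String))) : Option (List (String × String)) :=
  let ingL := PySem.Chars.lower ingredient.toList
  match product_identifiers.find? (fun p => pvSubMatch ingL p) with
  | some p => some p
  | none =>
      let ingW := pvSigWords ingredient.toList
      match PySem.List.max? product_identifiers (fun p => pvOverlap ingW p) with
      | some best =>
          if 2 ≤ pvOverlap ingW best then some best else pvSingle product_identifiers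
      | none => pvSingle product_identifiers

-- ===== PRECONDITION & SPEC =====
def Spec_find_product_for_ingredient_py (ingredient : String) (product_identifiers : List (List (String × String))) (out : Option (List (String × String))) : Prop := out = find_product_for_ingredient_py_alt ingredient product_identifiers
instance (ingredient : String) (product_identifiers : List (List (String × String))) (out : Option (List (String × String))) : Decidable (Spec_find_product_for_ingredient_py ingredient product_identifiers out) := by unfold Spec_find_product_for_ingredient_py; infer_instance

-- ===== CLAIM (what is proved, stated in full; the proofs are below) =====
def Claim_equal_find_product_for_ingredient_py : Prop := ∀ (ingredient : String) (product_identifiers : List (List (String × String))), Dom_find_product_for_ingredient_py ingredient product_identifiers → Spec_find_product_for_ingredient_py ingredient product_identifiers (find_product_for_ingredient_py ingredient product_identifiers)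

-- ===== LEMMAS AND PROOFS =====

-- the accumulator step of PySem.List.max? with key pvOverlap ingW
def pvPick (ingW : PySem.Set (List Char)) (acc : Option (List (String × String)))
    (p : List (String × String)) : Option (List (String × String)) :=
  match acc with
  | none => some p
  | some m => if pvOverlap ingW m < pvOverlap ingW p then some p else some m

theorem pvMax?_eq_foldl (ingW : PySem.Set (List Char)) (l : List (List (String × String))) :
    PySem.List.max? l (fun p => pvOverlap ingW p) = l.foldl (pvPick ingW) none := by
  unfold PySem.List.max?
  congr 1
  funext acc x
  cases acc <;> rfl

theorem pvOverlap_nil (ingW : PySem.Set (List Char)) : pvOverlap ingW [] = 0 := by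
  have h1 : ∀ k : String, PySem.Dict.getD (⟨[]⟩ : PySem.Dict String String) k "" = "" :=
    fun _ => rfl
  unfold pvOverlap
  rw [h1, h1, h1]
  rw [show PySem.Set.union (PySem.Set.union (pvSigWords (PySem.Chars.lower "".toList))
        (pvSigWords (PySem.Chars.lower "".toList))) (pvSigWords (PySem.Chars.lower "".toList))
      = ([] : List (List Char)) from by decide]
  simp [PySem.Set.inter, PySem.Set.len]

-- the post-loop thresholding applied to a fold result
def pvThen (ingW : PySem.Set (List Char)) (o : Option (List (String × String))) :
    Option (List (String × String)) :=
  match o with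
  | some b => if 2 ≤ pvOverlap ingW b then some b else none
  | none => none

-- a fold start whose overlap is below the threshold cannot influence the thresholded result
theorem pvPick_low (ingW : PySem.Set (List Char)) :
    ∀ (l : List (List (String × String))) (acc acc' : Option (List (String × String))),
    (∀ x, acc = some x → pvOverlap ingW x < 2) → (∀ x, acc' = some x → pvOverlap ingW x < 2) →
    pvThen ingW (l.foldl (pvPick ingW) acc) = pvThen ingW (l.foldl (pvPick ingW) acc') := by
  intro l
  induction l with
  | nil =>
      intro acc acc' h h'
      simp only [List.foldl]
      cases acc with
      | none =>
          cases acc' with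
          | none => rfl
          | some b => have := h' b rfl; simp only [pvThen]; rw [if_neg (by omega)]
      | some a =>
          have ha := h a rfl
          cases acc' with
          | none => simp only [pvThen]; rw [if_neg (by omega)]
          | some b =>
              have := h' b rfl
              simp only [pvThen]; rw [if_neg (by omega), if_neg (by omega)]
  | cons c t ih =>
      intro acc acc' h h'
      by_cases hc : 2 ≤ pvOverlap ingW c
      · have e1 : pvPick ingW acc c = some c := by
          cases acc with
          | none => rfl
          | some a => have := h a rfl; simp only [pvPick]; rw [if_pos (by omega)]
        have e2 : pvPick ingW acc' c = some c := by
          cases acc' with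
          | none => rfl
          | some a => have := h' a rfl; simp only [pvPick]; rw [if_pos (by omega)]
        simp only [List.foldl, e1, e2]
      · have h1 : ∀ x, pvPick ingW acc c = some x → pvOverlap ingW x < 2 := by
          intro x hx
          cases acc with
          | none => simp only [pvPick] at hx; cases hx; omega
          | some a =>
              have := h a rfl
              simp only [pvPick] at hx
              split at hx <;> (cases hx; omega)
        have h2 : ∀ x, pvPick ingW acc' c = some x → pvOverlap ingW x < 2 := by
          intro x hx
          cases acc' with
          | none => simp only [pvPick] at hx; cases hx; omega
          | some a =>
              have := h' a rfl
              simp only [pvPick] at hx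
              split at hx <;> (cases hx; omega)
        simpa only [List.foldl] using ih (pvPick ingW acc c) (pvPick ingW acc' c) h1 h2

-- a fold started from an accepted element ends at an element of at least that overlap
theorem pvPick_ge (ingW : PySem.Set (List Char)) :
    ∀ (t : List (List (String × String))) (a : List (String × String)),
    ∃ b, t.foldl (pvPick ingW) (some a) = some b ∧ pvOverlap ingW a ≤ pvOverlap ingW b := by
  intro t
  induction t with
  | nil => intro a; exact ⟨a, rfl, le_refl _⟩
  | cons c t ih =>
      intro a
      by_cases h : pvOverlap ingW a < pvOverlap ingW c
      · obtain ⟨b, hb, hle⟩ := ih c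
        refine ⟨b, ?_, by omega⟩
        simp only [List.foldl, pvPick]
        rw [if_pos h]
        exact hb
      · obtain ⟨b, hb, hle⟩ := ih a
        refine ⟨b, ?_, hle⟩
        simp only [List.foldl, pvPick]
        rw [if_neg h]
        exact hb

-- the raw overlap expression of A's loop body is pvOverlap
theorem pvOv_raw (ingW : PySem.Set (List Char)) (q : List (String × String)) :
    PySem.Set.len (PySem.Set.inter ingW
      (PySem.Set.union (PySem.Set.union
        (pvSigWords (PySem.Chars.lower (PySem.Dict.getD ⟨q⟩ "name" "").toList))
        (pvSigWords (PySem.Chars.lower (PySem.Dict.getD ⟨q⟩ "type" "").toList)))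
        (pvSigWords (PySem.Chars.lower (PySem.Dict.getD ⟨q⟩ "brand" "").toList))))
    = pvOverlap ingW q := rfl

-- the loop, entered with an accepted best (2 ≤ overlap), is find? then running max from that best
theorem pvLoopA_some (ingL : List Char) (ingW : PySem.Set (List Char)) :
    ∀ (l : List (List (String × String))) (p0 : List (String × String)),
    2 ≤ pvOverlap ingW p0 →
    pvLoopA ingL ingW l (some p0) (pvOverlap ingW p0) =
      match l.find? (fun p => pvSubMatch ingL p) with
      | some p => some p
      | none => l.foldl (pvPick ingW) (some p0) := by
  intro l
  induction l with
  | nil =>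
      intro p0 h2
      have hne : p0.isEmpty = false := by
        cases p0 with
        | nil => have := pvOverlap_nil ingW; omega
        | cons a t => rfl
      simp only [pvLoopA, hne, List.find?, Bool.false_eq_true, if_false, List.foldl]
  | cons p rest ih =>
      intro p0 h2
      rw [List.find?_cons]
      cases hs : pvSubMatch ingL p with
      | true =>
          have hs' := hs
          simp only [pvSubMatch] at hs'
          simp only [pvLoopA, hs', if_true]
      | false =>
          have hs' := hs
          simp only [pvSubMatch] at hs'
          simp only [pvLoopA, hs', Bool.false_eq_true, if_false]
          rw [pvOv_raw ingW p]
          rw [show (List.foldl (pvPick ingW) (some p0) (p :: rest))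
              = List.foldl (pvPick ingW) (pvPick ingW (some p0) p) rest from rfl]
          by_cases hlt : pvOverlap ingW p0 < pvOverlap ingW p
          · have h2' : 2 ≤ pvOverlap ingW p := by omega
            rw [if_pos (by simp only [Bool.and_eq_true, decide_eq_true_eq]; exact ⟨h2', hlt⟩)]
            rw [ih p h2']
            simp only [pvPick]
            rw [if_pos hlt]
          · rw [if_neg (by simp only [Bool.and_eq_true, decide_eq_true_eq]; omega)]
            rw [ih p0 h2]
            simp only [pvPick]
            rw [if_neg hlt]

-- the loop from the initial state is find?, then thresholded running max
theorem pvLoopA_none (ingL : List Char) (ingW : PySem.Set (List Char)) :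
    ∀ (l : List (List (String × String))),
    pvLoopA ingL ingW l none 0 =
      match l.find? (fun p => pvSubMatch ingL p) with
      | some p => some p
      | none => pvThen ingW (l.foldl (pvPick ingW) none) := by
  intro l
  induction l with
  | nil => rfl
  | cons p rest ih =>
      rw [List.find?_cons]
      cases hs : pvSubMatch ingL p with
      | true =>
          have hs' := hs
          simp only [pvSubMatch] at hs'
          simp only [pvLoopA, hs', if_true]
      | false =>
          have hs' := hs
          simp only [pvSubMatch] at hs'
          simp only [pvLoopA, hs', Bool.false_eq_true, if_false]
          rw [pvOv_raw ingW p]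
          rw [show (List.foldl (pvPick ingW) none (p :: rest))
              = List.foldl (pvPick ingW) (some p) rest from rfl]
          by_cases h2 : 2 ≤ pvOverlap ingW p
          · rw [if_pos (by simp only [Bool.and_eq_true, decide_eq_true_eq]; omega)]
            rw [pvLoopA_some ingL ingW rest p h2]
            cases hf : rest.find? (fun q => pvSubMatch ingL q) with
            | some q => rfl
            | none =>
                obtain ⟨b, hb, hle⟩ := pvPick_ge ingW rest p
                rw [hb]
                simp only [pvThen]
                rw [if_pos (by omega)]
          · rw [if_neg (by simp only [Bool.and_eq_true, decide_eq_true_eq]; omega)]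
            rw [ih]
            cases hf : rest.find? (fun q => pvSubMatch ingL q) with
            | some q => rfl
            | none =>
                exact pvPick_low ingW rest none (some p)
                  (by intro x hx; cases hx) (by intro x hx; cases hx; omega)

-- ===== VERDICT (by name: the statement is the Claim_ definition above) =====
theorem find_product_for_ingredient_py_spec : Claim_equal_find_product_for_ingredient_py := by
  unfold Claim_equal_find_product_for_ingredient_py
  intro ing pis _hdom
  unfold Spec_find_product_for_ingredient_py
  unfold find_product_for_ingredient_py find_product_for_ingredient_py_alt
  cases pis with
  | nil => rfl
  | cons x rest =>
      simp only [List.isEmpty_cons, Bool.false_eq_true, if_false]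
      rw [pvLoopA_none]
      rw [pvMax?_eq_foldl]
      cases hf : (x :: rest).find? (fun p => pvSubMatch (PySem.Chars.lower ing.toList) p) with
      | some p => rfl
      | none =>
          simp only
          rw [show List.foldl (pvPick (pvSigWords ing.toList)) none (x :: rest)
              = List.foldl (pvPick (pvSigWords ing.toList)) (some x) rest from rfl]
          obtain ⟨b, hb, _⟩ := pvPick_ge (pvSigWords ing.toList) rest x
          rw [hb]
          simp only [pvThen]
          by_cases h2 : 2 ≤ pvOverlap (pvSigWords ing.toList) b
          · rw [if_pos h2, if_pos h2]
          · rw [if_neg h2, if_neg h2]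
            rfl
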